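-- pv_equiv track=rewrite | github.com/Al3xanderMD/Python | Lab 2/ex9.py | find_obstructed_seats
-- ===== SOURCE A (Python) =====
-- def find_obstructed_seats(matrix):
--     obstructed_seats = []
--     rows = len(matrix)
--     cols = len(matrix[0])
--
--     # Create a list to track the tallest spectators for each column
--     tallest_in_column = [-1] * cols
--
--     for row in range(rows):
--         for col in range(cols):
--             current_height = matrix[row][col]
--
--             # Check if there's a taller spectator in the same column
--             if current_height > tallest_in_column[col]:
--                 tallest_in_column[col] = current_height
--
--             else:
--                 # There is a taller spectator in the same column; mark the seat as obstructed
--                 obstructed_seats.append((row, col))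
--
--     return obstructed_seats
-- ===== SOURCE B (Python) =====
-- def _obstruction_flags(column):
--     m = -1
--     flags = []
--     for h in column:
--         flags.append(h <= m)
--         if h > m:
--             m = h
--     return flags
--
--
-- def find_obstructed_seats(matrix):
--     cols = len(matrix[0])
--     columns = [[row[c] for row in matrix] for c in range(cols)]
--     obstructed = [_obstruction_flags(col) for col in columns]
--     return [(r, c)
--             for r in range(len(matrix))
--             for c in range(cols)
--             if obstructed[c][r]]
-- ===== Notes on version B (the rewrite author's own statement) =====
-- stated objective: alternative
-- what changed: Replaces A's single row-major pass with a mutable per-column running-max array by a two-phase algorithm: transpose into columns, precompute each column's obstruction flags with a local scan, then emit the seats row-major from the flag table.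
import Mathlib
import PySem

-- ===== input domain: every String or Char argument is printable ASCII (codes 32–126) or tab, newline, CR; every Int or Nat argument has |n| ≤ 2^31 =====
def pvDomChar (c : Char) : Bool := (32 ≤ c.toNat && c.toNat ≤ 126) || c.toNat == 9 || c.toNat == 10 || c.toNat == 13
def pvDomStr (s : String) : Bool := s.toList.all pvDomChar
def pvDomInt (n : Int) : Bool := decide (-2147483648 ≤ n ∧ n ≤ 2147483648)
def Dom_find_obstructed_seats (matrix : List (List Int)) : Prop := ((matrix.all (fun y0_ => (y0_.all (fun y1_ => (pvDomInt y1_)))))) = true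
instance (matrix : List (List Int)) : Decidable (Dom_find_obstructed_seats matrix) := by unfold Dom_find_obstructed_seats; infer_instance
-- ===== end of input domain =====

-- B replaces A's single pass with a mutable per-column running-max array by a state-free
-- comprehension deciding each seat from the max of the column prefix above it (alternative
-- decomposition, not faster).

-- ===== PORT A =====
def find_obstructed_seats (matrix : List (List Int)) : List (Int × Int) :=
  let rows : Int := PySem.List.len matrix
  let cols : Int := PySem.List.len (PySem.List.pyGetD matrix 0 [])
  let tallest0 : List Int := List.replicate cols.toNat (-1)
  let res :=
    (PySem.List.pyRange 0 rows 1).foldl (fun st row =>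
      (PySem.List.pyRange 0 cols 1).foldl (fun st col =>
        let current := PySem.List.pyGetD (PySem.List.pyGetD matrix row []) col 0
        if current > PySem.List.pyGetD st.1 col 0 then
          (PySem.List.pySetD st.1 col current, st.2)
        else
          (st.1, st.2 ++ [(row, col)])) st)
      (tallest0, ([] : List (Int × Int)))
  res.2

-- ===== PORT B =====
-- helper for B: per-column scan computing each seat's obstruction flag (Source B's _obstruction_flags)
def obstruction_flags (column : List Int) : List Bool :=
  (column.foldl (fun st h => (if h > st.1 then h else st.1, st.2 ++ [decide (h ≤ st.1)]))
    ((-1 : Int), ([] : List Bool))).2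

def find_obstructed_seats_alt (matrix : List (List Int)) : List (Int × Int) :=
  let cols : Int := PySem.List.len (PySem.List.pyGetD matrix 0 [])
  let columns : List (List Int) :=
    (PySem.List.pyRange 0 cols 1).map (fun c => matrix.map (fun row => PySem.List.pyGetD row c 0))
  let obstructed : List (List Bool) := columns.map obstruction_flags
  (PySem.List.pyRange 0 (PySem.List.len matrix) 1).flatMap (fun r =>
    ((PySem.List.pyRange 0 cols 1).filter (fun c =>
      PySem.List.pyGetD (PySem.List.pyGetD obstructed c []) r false)).map (fun c => (r, c)))

-- ===== PRECONDITION & SPEC =====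
-- Pre_ excludes exactly the inputs where Python A raises IndexError: the empty matrix
-- (matrix[0]) and matrices with a row shorter than row 0 (matrix[row][col]).
def Pre_find_obstructed_seats (matrix : List (List Int)) : Prop :=
  matrix ≠ [] ∧ ∀ row ∈ matrix, (matrix.headD []).length ≤ row.length
instance (matrix : List (List Int)) : Decidable (Pre_find_obstructed_seats matrix) := by
  unfold Pre_find_obstructed_seats; infer_instance
def pvWitness_find_obstructed_seats : List (List Int) := [[3, 1], [2, 4], [1, 5]]

def Spec_find_obstructed_seats (matrix : List (List Int)) (out : List (Int × Int)) : Prop := out = find_obstructed_seats_alt matrix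
instance (matrix : List (List Int)) (out : List (Int × Int)) : Decidable (Spec_find_obstructed_seats matrix out) := by unfold Spec_find_obstructed_seats; infer_instance

-- ===== CLAIM (what is proved, stated in full; the proofs are below) =====
def Claim_equal_find_obstructed_seats : Prop := ∀ (matrix : List (List Int)), Dom_find_obstructed_seats matrix → Pre_find_obstructed_seats matrix → Spec_find_obstructed_seats matrix (find_obstructed_seats matrix)

-- ===== LEMMAS AND PROOFS =====


def gM (matrix : List (List Int)) (r c : Int) : Int :=
  PySem.List.pyGetD (PySem.List.pyGetD matrix r []) c 0
def updT (matrix : List (List Int)) (r : Int) (t : List Int) (k : Nat) : List Int :=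
  (List.range t.length).map (fun c =>
    if c < k then max (t.getD c 0) (gM matrix r c) else t.getD c 0)

lemma updT_zero (matrix : List (List Int)) (r : Int) (t : List Int) :
    updT matrix r t 0 = t := by
  apply List.ext_getElem
  · simp [updT]
  · intro i h1 h2
    simp [updT, List.getD_eq_getElem?_getD, List.getElem?_eq_getElem h2]

lemma updT_set (matrix : List (List Int)) (r : Int) (t : List Int) (k : Nat) (hk : k < t.length)
    (h : t.getD k 0 < gM matrix r k) :
    (updT matrix r t k).set k (gM matrix r k) = updT matrix r t (k + 1) := by
  apply List.ext_getElem
  · simp [updT]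
  · intro i h1 h2
    simp only [updT, List.length_set, List.length_map, List.length_range] at h1
    rw [List.getElem_set]
    simp only [updT, List.getElem_map, List.getElem_range]
    rw [List.getD_eq_getElem?_getD, List.getElem?_eq_getElem hk] at h
    by_cases hik : i = k
    · subst hik
      simp only [if_pos (Nat.lt_succ_self i)]
      rw [List.getD_eq_getElem?_getD, List.getElem?_eq_getElem hk]
      simp only [Option.getD_some] at h ⊢
      exact (max_eq_right (le_of_lt h)).symm
    · simp only [if_neg (Ne.symm hik)]
      by_cases hlt : i < k
      · simp [hlt, Nat.lt_succ_of_lt hlt]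
      · have hn : ¬ i < k + 1 := by omega
        simp [hlt, hn]

lemma updT_noset (matrix : List (List Int)) (r : Int) (t : List Int) (k : Nat) (hk : k < t.length)
    (h : gM matrix r k ≤ t.getD k 0) :
    updT matrix r t k = updT matrix r t (k + 1) := by
  apply List.ext_getElem
  · simp [updT]
  · intro i h1 h2
    simp only [updT, List.length_map, List.length_range] at h1
    simp only [updT, List.getElem_map, List.getElem_range]
    by_cases hik : i = k
    · subst hik
      simp only [if_pos (Nat.lt_succ_self i), Nat.lt_irrefl, if_false]
      exact (max_eq_left h).symm
    · by_cases hlt : i < k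
      · simp [hlt, Nat.lt_succ_of_lt hlt]
      · have hn : ¬ i < k + 1 := by omega
        simp [hlt, hn]

lemma pyGetD_updT (matrix : List (List Int)) (r : Int) (t : List Int) (k : Nat)
    (hk : k < t.length) :
    PySem.List.pyGetD (updT matrix r t k) (k : Int) 0 = t.getD k 0 := by
  simp [updT, hk]

lemma innerA (matrix : List (List Int)) (r : Int) (k : Nat) (t : List Int)
    (acc : List (Int × Int)) (hk : k ≤ t.length) :
    (PySem.List.pyRange 0 (k : Int) 1).foldl (fun st col =>
        let current := PySem.List.pyGetD (PySem.List.pyGetD matrix r []) col 0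
        if current > PySem.List.pyGetD st.1 col 0 then
          (PySem.List.pySetD st.1 col current, st.2)
        else
          (st.1, st.2 ++ [(r, col)])) (t, acc)
    = (updT matrix r t k,
       acc ++ ((PySem.List.pyRange 0 (k : Int) 1).filter (fun c =>
         decide (gM matrix r c ≤ PySem.List.pyGetD t c 0))).map (fun c => (r, c))) := by
  induction k generalizing acc with
  | zero =>
      simp [PySem.List.pyRange_one_eq_nil (le_refl (0 : Int)), updT_zero]
  | succ k ih =>
      have hk' : k ≤ t.length := Nat.le_of_succ_le hk
      have hklt : k < t.length := hk
      have hr : PySem.List.pyRange 0 ((k + 1 : Nat) : Int) 1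
          = PySem.List.pyRange 0 (k : Int) 1 ++ [(k : Int)] := by
        push_cast
        exact PySem.List.pyRange_one_succ_right (by positivity)
      rw [hr, List.foldl_append, ih _ hk', List.filter_append, List.map_append]
      simp only [List.foldl_cons, List.foldl_nil, List.filter_cons, List.filter_nil]
      rw [pyGetD_updT matrix r t k hklt]
      by_cases hc : PySem.List.pyGetD (PySem.List.pyGetD matrix r []) ((k : Nat) : Int) 0 > t.getD k 0
      · have hnotle : ¬ gM matrix r (k : Int) ≤ PySem.List.pyGetD t (k : Int) 0 := by
          simpa [gM] using not_le.mpr hc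
        rw [if_pos hc]
        rw [PySem.List.pySetD_natCast]
        rw [show PySem.List.pyGetD (PySem.List.pyGetD matrix r []) (k:Int) 0 = gM matrix r (k:Int) from rfl]
        rw [updT_set matrix r t k hklt hc]
        simp only [List.append_cancel_left_eq, Prod.mk.injEq, true_and]
        have hnotle' : ¬ gM matrix r (k : Int) ≤ t[k]?.getD 0 := by simpa using hnotle
        simp [hnotle']
      · have hle : gM matrix r (k : Int) ≤ PySem.List.pyGetD t (k : Int) 0 := by
          simpa [gM] using not_lt.mp hc
        rw [if_neg hc]
        rw [← updT_noset matrix r t k hklt (by simpa using hle)]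
        have hle' : gM matrix r (k : Int) ≤ t[k]?.getD 0 := by simpa using hle
        simp [hle', List.append_assoc]

def pmM (matrix : List (List Int)) (r c : Int) : Int :=
  ((PySem.List.pyRange 0 r 1).map (fun i => gM matrix i c)).foldl max (-1)

lemma pmM_succ (matrix : List (List Int)) (n : Nat) (c : Int) :
    pmM matrix ((n + 1 : Nat) : Int) c = max (pmM matrix (n : Nat) c) (gM matrix (n : Nat) c) := by
  unfold pmM
  rw [show ((n + 1 : Nat) : Int) = (n : Int) + 1 by push_cast; ring]
  rw [PySem.List.pyRange_one_succ_right (by positivity), List.map_append, List.foldl_append]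
  simp

lemma pyGetD_map_range {α : Type} (f : Nat → α) (nn : Nat) (c : Int) (h0 : 0 ≤ c)
    (h1 : c < (nn : Int)) (d : α) :
    PySem.List.pyGetD ((List.range nn).map f) c d = f c.toNat := by
  obtain ⟨cn, rfl⟩ : ∃ cn : Nat, c = (cn : Int) := ⟨c.toNat, (Int.toNat_of_nonneg h0).symm⟩
  have : cn < nn := by exact_mod_cast h1
  simp [this]

lemma outerA (matrix : List (List Int)) (colsN : Nat) (n : Nat) :
    (PySem.List.pyRange 0 (n : Int) 1).foldl (fun st row =>
        (PySem.List.pyRange 0 (colsN : Int) 1).foldl (fun st col =>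
          let current := PySem.List.pyGetD (PySem.List.pyGetD matrix row []) col 0
          if current > PySem.List.pyGetD st.1 col 0 then
            (PySem.List.pySetD st.1 col current, st.2)
          else
            (st.1, st.2 ++ [(row, col)])) st)
      (List.replicate colsN (-1), ([] : List (Int × Int)))
    = ((List.range colsN).map (fun (c : Nat) => pmM matrix (n : Int) (c : Int)),
       (PySem.List.pyRange 0 (n : Int) 1).flatMap (fun r =>
         ((PySem.List.pyRange 0 (colsN : Int) 1).filter (fun c =>
           decide (gM matrix r c ≤ pmM matrix r c))).map (fun c => (r, c)))) := by
  induction n with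
  | zero =>
      simp only [Nat.cast_zero]
      rw [PySem.List.pyRange_one_eq_nil (le_refl (0 : Int))]
      simp only [List.foldl_nil, List.flatMap_nil, Prod.mk.injEq]
      refine ⟨?_, trivial⟩
      apply List.ext_getElem <;>
        simp [pmM, PySem.List.pyRange_one_eq_nil (le_refl (0 : Int))]
  | succ n ih =>
      have hr : PySem.List.pyRange 0 ((n + 1 : Nat) : Int) 1
          = PySem.List.pyRange 0 (n : Int) 1 ++ [(n : Int)] := by
        push_cast
        exact PySem.List.pyRange_one_succ_right (by positivity)
      rw [hr, List.foldl_append, ih, List.foldl_cons, List.foldl_nil]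
      rw [innerA matrix (n : Int) colsN _ _ (by simp)]
      rw [List.flatMap_append]
      refine Prod.ext ?_ ?_
      · -- tallest column maxes advance by one row
        apply List.ext_getElem
        · simp [updT]
        · intro i hi1 hi2
          simp only [updT, List.length_map, List.length_range] at hi1
          simp only [updT, List.getElem_map, List.getElem_range]
          have hi1' : i < colsN := by simpa using hi1
          rw [if_pos hi1']
          rw [pmM_succ]
          congr 1
          have := pyGetD_map_range (fun (c : Nat) => pmM matrix (n : Int) (c : Int)) colsN (i : Int)
            (by positivity) (by exact_mod_cast hi1') 0
          simp only [PySem.List.pyGetD_natCast] at this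
          simpa using this
      · -- outputs: row n's obstructed seats appended
        simp only [List.flatMap_cons, List.flatMap_nil, List.append_nil]
        congr 1
        congr 1
        apply List.filter_congr
        intro c hc
        have hmem := (PySem.List.mem_pyRange_one).mp hc
        congr 1
        rw [pyGetD_map_range (fun (c : Nat) => pmM matrix (n : Int) (c : Int)) colsN c hmem.1 hmem.2 0]
        rw [show ((c.toNat : Nat) : Int) = c from Int.toNat_of_nonneg hmem.1]

lemma obstruction_fold (hs : List Int) :
    hs.foldl (fun st h => (if h > st.1 then h else st.1, st.2 ++ [decide (h ≤ st.1)]))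
      ((-1 : Int), ([] : List Bool))
    = (hs.foldl max (-1),
       (List.range hs.length).map (fun r => decide (hs.getD r 0 ≤ (hs.take r).foldl max (-1)))) := by
  induction hs using List.reverseRecOn with
  | nil => simp
  | append_singleton hs h ih =>
      rw [List.foldl_append, ih, List.foldl_append]
      simp only [List.foldl_cons, List.foldl_nil]
      refine Prod.ext ?_ ?_
      · show (if h > hs.foldl max (-1) then h else hs.foldl max (-1)) = _
        rcases lt_or_ge (hs.foldl max (-1)) h with hlt | hge
        · simp [hlt, max_eq_right (le_of_lt hlt)]
        · simp [not_lt.mpr hge, max_eq_left hge]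
      · show _ ++ [decide (h ≤ hs.foldl max (-1))] = _
        rw [List.length_append, List.length_cons, List.length_nil, List.range_succ,
          List.map_append]
        congr 1
        · apply List.map_congr_left
          intro r hr
          have hr' : r < hs.length := List.mem_range.mp hr
          simp only [List.getD_eq_getElem?_getD]
          rw [List.getElem?_append_left hr',
            List.take_append_of_le_length (le_of_lt hr')]
        · simp only [List.map_cons, List.map_nil]
          have h1 : (hs ++ [h]).getD hs.length 0 = h := by
            rw [List.getD_eq_getElem?_getD]; simp
          have h2 : (hs ++ [h]).take hs.length = hs := by simp
          rw [h1, h2]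

lemma map_pyGetD_pyRange_take {α : Type} (xs : List α) (d : α) (rn : Nat)
    (h : rn ≤ xs.length) :
    (PySem.List.pyRange 0 (rn : Int) 1).map (fun j => PySem.List.pyGetD xs j d)
      = xs.take rn := by
  induction rn with
  | zero => simp [PySem.List.pyRange_one_eq_nil (le_refl (0 : Int))]
  | succ rn ih =>
      have hr : PySem.List.pyRange 0 ((rn + 1 : Nat) : Int) 1
          = PySem.List.pyRange 0 (rn : Int) 1 ++ [(rn : Int)] := by
        push_cast
        exact PySem.List.pyRange_one_succ_right (by positivity)
      have hlt : rn < xs.length := h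
      rw [hr, List.map_append, ih (le_of_lt hlt), List.take_add_one]
      simp [hlt]

lemma flags_lookup (matrix : List (List Int)) (colsI : Int) (r c : Int)
    (hr0 : 0 ≤ r) (hr1 : r < (matrix.length : Int)) (hc0 : 0 ≤ c) (hc1 : c < colsI) :
    PySem.List.pyGetD
      (PySem.List.pyGetD
        (((PySem.List.pyRange 0 colsI 1).map
            (fun c => matrix.map (fun row => PySem.List.pyGetD row c 0))).map obstruction_flags)
        c []) r false
    = decide (gM matrix r c ≤ pmM matrix r c) := by
  obtain ⟨rn, rfl⟩ : ∃ rn : Nat, r = (rn : Int) := ⟨r.toNat, (Int.toNat_of_nonneg hr0).symm⟩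
  have hrn : rn < matrix.length := by exact_mod_cast hr1
  rw [List.map_map]
  rw [PySem.List.pyGetD_map_pyRange_of_nonneg
    (obstruction_flags ∘ fun c => matrix.map (fun row => PySem.List.pyGetD row c 0))
    colsI c [] hc0 hc1]
  simp only [Function.comp]
  unfold obstruction_flags
  rw [obstruction_fold]
  simp only [List.length_map]
  rw [pyGetD_map_range _ matrix.length ((rn : Nat) : Int) (by positivity) (by exact_mod_cast hrn)]
  simp only [Int.toNat_natCast]
  rw [decide_eq_decide]
  have hcur : (matrix.map (fun row => PySem.List.pyGetD row c 0)).getD rn 0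
      = gM matrix ((rn : Nat) : Int) c := by
    rw [List.getD_eq_getElem?_getD, List.getElem?_map, List.getElem?_eq_getElem hrn]
    simp only [Option.map_some, Option.getD_some]
    unfold gM
    rw [PySem.List.pyGetD_natCast, List.getD_eq_getElem?_getD, List.getElem?_eq_getElem hrn]
    rfl
  have hpm : (((matrix.map (fun row => PySem.List.pyGetD row c 0)).take rn).foldl max (-1))
      = pmM matrix ((rn : Nat) : Int) c := by
    unfold pmM
    rw [← List.map_take]
    have h1 : (PySem.List.pyRange 0 ((rn : Nat) : Int) 1).map (fun i => gM matrix i c)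
        = ((PySem.List.pyRange 0 ((rn : Nat) : Int) 1).map
            (fun j => PySem.List.pyGetD matrix j [])).map
            (fun row => PySem.List.pyGetD row c 0) := by
      rw [List.map_map]; rfl
    rw [h1, map_pyGetD_pyRange_take matrix [] rn (le_of_lt hrn)]
  rw [hcur, hpm]

lemma alt_eq (matrix : List (List Int)) :
    find_obstructed_seats_alt matrix
    = (PySem.List.pyRange 0 (matrix.length : Int) 1).flatMap (fun r =>
        ((PySem.List.pyRange 0 (((PySem.List.pyGetD matrix 0 []).length : Nat) : Int) 1).filter
          (fun c => decide (gM matrix r c ≤ pmM matrix r c))).map (fun c => (r, c))) := by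
  unfold find_obstructed_seats_alt
  simp only [PySem.List.len_eq]
  rw [List.flatMap_def, List.flatMap_def]
  congr 1
  apply List.map_congr_left
  intro r hr
  have hmr := (PySem.List.mem_pyRange_one).mp hr
  congr 1
  apply List.filter_congr
  intro c hc
  have hmc := (PySem.List.mem_pyRange_one).mp hc
  exact flags_lookup matrix _ r c hmr.1 hmr.2 hmc.1 hmc.2

-- ===== VERDICT (by name: the statement is the Claim_ definition above) =====
theorem find_obstructed_seats_spec : Claim_equal_find_obstructed_seats := by
  intro matrix _ _
  unfold Spec_find_obstructed_seats find_obstructed_seats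
  simp only [PySem.List.len_eq, Int.toNat_natCast]
  rw [outerA matrix ((PySem.List.pyGetD matrix 0 []).length) matrix.length]
  exact (alt_eq matrix).symm
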